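-- pv_equiv track=rewrite | github.com/abinavChandar/demo_env_l4 | dsl_primitives.py | dsl_paste
-- ===== SOURCE A (Python) =====
-- from typing import List, Tuple, Dict, Iterable, Optional
--
-- Grid = List[List[int]]
--
-- def dsl_shape(G: Grid) -> Tuple[int, int]:
--     return (len(G), len(G[0]) if G and G[0] is not None else 0)
--
-- def dsl_clone(G: Grid) -> Grid:
--     return [row[:] for row in G]
--
-- def dsl_clamp(x: int) -> int:
--     # ARC colors are 0..9
--     if x < 0: return 0
--     if x > 9: return 9
--     return x
--
-- def dsl_in_bounds(G: Grid, r: int, c: int) -> bool: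
--     H, W = dsl_shape(G)
--     return 0 <= r < H and 0 <= c < W
--
-- def dsl_paste(G: Grid, src: Grid, r0: int, c0: int) -> Grid:
--     # Paste src onto G at (r0, c0), clipped.
--     Hs, Ws = dsl_shape(src)
--     G2 = dsl_clone(G)
--     for r in range(Hs):
--         for c in range(Ws):
--             rr, cc = r0 + r, c0 + c
--             if dsl_in_bounds(G2, rr, cc):
--                 G2[rr][cc] = dsl_clamp(src[r][c])
--     return G2
-- ===== SOURCE B (Python) =====
-- def dsl_paste(G, src, r0, c0):
--     # Paste src onto a copy of G at (r0, c0), clipped to G: compute the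
--     # clipped overlap window once and rebuild only overlapped rows by slicing.
--     H = len(G)
--     W = len(G[0]) if G else 0
--     Hs = len(src)
--     Ws = len(src[0]) if src else 0
--     rlo, rhi = max(0, r0), min(H, r0 + Hs)
--     clo, chi = max(0, c0), min(W, c0 + Ws)
--     out = []
--     for rr, row in enumerate(G):
--         if rlo <= rr < rhi and clo < chi:
--             seg = [min(9, max(0, v)) for v in src[rr - r0][clo - c0:chi - c0]]
--             out.append(row[:clo] + seg + row[chi:])
--         else:
--             out.append(list(row))
--     return out
-- ===== Notes on version B (the rewrite author's own statement) =====
-- stated objective: faster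
-- what changed: Instead of scanning all Hs*Ws source cells with a per-cell bounds check and in-place mutation, B computes the clipped overlap window once and rebuilds each overlapped row by list slicing (prefix ++ clamped segment ++ suffix), touching only the intersection.
import Mathlib
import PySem

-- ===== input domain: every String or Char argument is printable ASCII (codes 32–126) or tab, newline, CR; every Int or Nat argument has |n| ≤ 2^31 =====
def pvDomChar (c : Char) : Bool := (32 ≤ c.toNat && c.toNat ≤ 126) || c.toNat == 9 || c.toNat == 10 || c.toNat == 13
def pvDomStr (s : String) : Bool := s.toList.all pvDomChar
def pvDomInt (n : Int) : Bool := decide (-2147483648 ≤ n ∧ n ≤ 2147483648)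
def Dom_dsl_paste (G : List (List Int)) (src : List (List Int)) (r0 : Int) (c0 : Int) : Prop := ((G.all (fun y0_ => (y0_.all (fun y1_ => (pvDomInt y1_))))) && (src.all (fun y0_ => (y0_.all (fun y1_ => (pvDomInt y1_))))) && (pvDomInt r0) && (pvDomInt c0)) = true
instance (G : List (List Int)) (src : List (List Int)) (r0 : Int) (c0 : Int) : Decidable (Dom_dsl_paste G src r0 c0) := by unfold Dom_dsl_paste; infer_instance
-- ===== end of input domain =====

-- B pastes by rebuilding only the rows of the clipped overlap window with list slicing,
-- instead of A's per-cell bounds-checked scan of all of src; objective: faster.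

-- ===== PORT A =====
def dsl_shape (G : List (List Int)) : Int × Int :=
  -- rows are lists, never None, so `G and G[0] is not None` is just nonemptiness
  ((G.length : Int), match G with | [] => 0 | g0 :: _ => (g0.length : Int))

def dsl_clone (G : List (List Int)) : List (List Int) :=
  G.map (fun row => PySem.List.slice row none none)

def dsl_clamp (x : Int) : Int :=
  if x < 0 then 0 else if x > 9 then 9 else x

def dsl_in_bounds (G : List (List Int)) (r : Int) (c : Int) : Bool :=
  let s := dsl_shape G
  decide (0 ≤ r ∧ r < s.1 ∧ 0 ≤ c ∧ c < s.2)

def dsl_paste (G : List (List Int)) (src : List (List Int)) (r0 : Int) (c0 : Int) : List (List Int) :=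
  let s := dsl_shape src
  let G2 := dsl_clone G
  (PySem.List.pyRange 0 s.1 1).foldl (fun G2 r =>
    (PySem.List.pyRange 0 s.2 1).foldl (fun G2 c =>
      let rr := r0 + r
      let cc := c0 + c
      if dsl_in_bounds G2 rr cc then
        -- G2[rr][cc] = dsl_clamp(src[r][c]); the guard makes rr,cc in range for G2,
        -- and Pre_ makes the src/G2-row accesses in range (Python raises outside Pre_,
        -- where pyGetD/pySetD default instead)
        PySem.List.pySetD G2 rr
          (PySem.List.pySetD (PySem.List.pyGetD G2 rr []) cc
            (dsl_clamp (PySem.List.pyGetD (PySem.List.pyGetD src r []) c 0)))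
      else G2) G2) G2

-- ===== PORT B =====
def dsl_paste_alt (G : List (List Int)) (src : List (List Int)) (r0 : Int) (c0 : Int) : List (List Int) :=
  let H : Int := G.length
  let W : Int := match G with | [] => 0 | g0 :: _ => (g0.length : Int)
  let Hs : Int := src.length
  let Ws : Int := match src with | [] => 0 | s0 :: _ => (s0.length : Int)
  let rlo := max 0 r0
  let rhi := min H (r0 + Hs)
  let clo := max 0 c0
  let chi := min W (c0 + Ws)
  (PySem.List.enumerate G 0).foldl (fun out p =>
    if rlo ≤ p.1 ∧ p.1 < rhi ∧ clo < chi then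
      -- src[rr - r0] is in range inside the branch; the slice clips like Python's
      let seg := (PySem.List.slice (PySem.List.pyGetD src (p.1 - r0) []) (some (clo - c0)) (some (chi - c0))).map
        (fun v => min 9 (max 0 v))
      out ++ [PySem.List.slice p.2 none (some clo) ++ seg ++ PySem.List.slice p.2 (some chi) none]
    else out ++ [PySem.List.slice p.2 none none]) []

-- ===== PRECONDITION & SPEC =====
-- Pre_ is exactly "A returns": on non-rectangular grids whose ragged part lies inside the
-- paste window, A raises IndexError (indexing a short row); such inputs are excluded.
def Pre_dsl_paste (G : List (List Int)) (src : List (List Int)) (r0 : Int) (c0 : Int) : Prop :=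
  ∀ r : Nat, r < src.length → ∀ c : Nat, c < (src.head?.getD []).length →
    (0 ≤ r0 + (r : Int) ∧ r0 + (r : Int) < (G.length : Int) ∧
     0 ≤ c0 + (c : Int) ∧ c0 + (c : Int) < ((G.head?.getD []).length : Int)) →
    ((c : Int) < ((src[r]?.getD []).length : Int) ∧
     c0 + (c : Int) < (((G[(r0 + (r : Int)).toNat]?).getD []).length : Int))
instance (G : List (List Int)) (src : List (List Int)) (r0 : Int) (c0 : Int) : Decidable (Pre_dsl_paste G src r0 c0) := by unfold Pre_dsl_paste; infer_instance

def pvWitness_dsl_paste : List (List Int) × List (List Int) × Int × Int :=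
  ([[1, 2], [3, 4]], [[5]], 0, 1)

def Spec_dsl_paste (G : List (List Int)) (src : List (List Int)) (r0 : Int) (c0 : Int) (out : List (List Int)) : Prop := out = dsl_paste_alt G src r0 c0
instance (G : List (List Int)) (src : List (List Int)) (r0 : Int) (c0 : Int) (out : List (List Int)) : Decidable (Spec_dsl_paste G src r0 c0 out) := by unfold Spec_dsl_paste; infer_instance

-- ===== CLAIM (what is proved, stated in full; the proofs are below) =====
def Claim_equal_dsl_paste : Prop := ∀ (G : List (List Int)) (src : List (List Int)) (r0 : Int) (c0 : Int), Dom_dsl_paste G src r0 c0 → Pre_dsl_paste G src r0 c0 → Spec_dsl_paste G src r0 c0 (dsl_paste G src r0 c0)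


-- ===== LEMMAS AND PROOFS =====

-- witness sanity
theorem pvWitness_ok : Dom_dsl_paste pvWitness_dsl_paste.1 pvWitness_dsl_paste.2.1 pvWitness_dsl_paste.2.2.1 pvWitness_dsl_paste.2.2.2 ∧ Pre_dsl_paste pvWitness_dsl_paste.1 pvWitness_dsl_paste.2.1 pvWitness_dsl_paste.2.2.1 pvWitness_dsl_paste.2.2.2 := by decide

theorem dsl_clone_eq (G : List (List Int)) : dsl_clone G = G := by
  simp [dsl_clone, PySem.List.slice_none_none]

theorem dsl_shape_fst (G : List (List Int)) : (dsl_shape G).1 = (G.length : Int) := rfl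

theorem dsl_shape_snd (G : List (List Int)) :
    (dsl_shape G).2 = ((G.head?.getD []).length : Int) := by
  cases G <;> simp [dsl_shape]

theorem matchW_eq (G : List (List Int)) :
    (match G with | [] => (0 : Int) | g0 :: _ => (g0.length : Int)) = ((G.head?.getD []).length : Int) := by
  cases G <;> simp

-- the effect of A's inner loop on one row, as a Nat recursion
def paintRowN (row srow : List Int) (c0 : Int) (W : Nat) : Nat → List Int
  | 0 => row
  | m+1 =>
    if 0 ≤ c0 + (m : Int) ∧ c0 + (m : Int) < (W : Int) then
      (paintRowN row srow c0 W m).set (c0 + (m : Int)).toNat (dsl_clamp (PySem.List.pyGetD srow (m : Int) 0))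
    else paintRowN row srow c0 W m

theorem paintRowN_length (row srow : List Int) (c0 : Int) (W m : Nat) :
    (paintRowN row srow c0 W m).length = row.length := by
  induction m with
  | zero => rfl
  | succ m ih => unfold paintRowN; split_ifs <;> simp [ih]

theorem paintRowN_getElem (row srow : List Int) (c0 : Int) (W m : Nat) (j : Nat)
    (hj : j < row.length) :
    (paintRowN row srow c0 W m)[j]'(by rw [paintRowN_length]; exact hj) =
      if c0 ≤ (j : Int) ∧ (j : Int) < c0 + (m : Int) ∧ (j : Int) < (W : Int) then
        dsl_clamp (PySem.List.pyGetD srow ((j : Int) - c0) 0)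
      else row[j] := by
  induction m with
  | zero =>
    simp only [paintRowN]
    rw [if_neg (by omega)]
  | succ m ih =>
    by_cases hc : 0 ≤ c0 + (m : Int) ∧ c0 + (m : Int) < (W : Int)
    · have h1 : paintRowN row srow c0 W (m+1)
          = (paintRowN row srow c0 W m).set (c0 + (m : Int)).toNat (dsl_clamp (PySem.List.pyGetD srow (m : Int) 0)) := by
        simp only [paintRowN]; rw [if_pos hc]
      rw [List.getElem_of_eq h1, List.getElem_set]
      by_cases he : (c0 + (m : Int)).toNat = j
      · rw [if_pos he, if_pos (by omega)]
        have hje : (j : Int) - c0 = (m : Int) := by omega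
        rw [hje]
      · rw [if_neg he, ih]
        split_ifs with h2 h3
        · rfl
        · omega
        · omega
        · rfl
    · have h1 : paintRowN row srow c0 W (m+1) = paintRowN row srow c0 W m := by
        simp only [paintRowN]; rw [if_neg hc]
      rw [List.getElem_of_eq h1, ih]
      split_ifs with h2 h3
      · rfl
      · omega
      · omega
      · rfl

theorem dsl_clamp_eq_minmax (x : Int) : dsl_clamp x = min 9 (max 0 x) := by
  unfold dsl_clamp; split_ifs <;> omega

theorem paintRowN_self (row srow : List Int) (c0 : Int) (W Ws : Nat)
    (h : ¬ (max 0 c0 < min (W : Int) (c0 + (Ws : Int)))) :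
    paintRowN row srow c0 W Ws = row := by
  apply List.ext_getElem (paintRowN_length row srow c0 W Ws)
  intro i h1 h2
  rw [paintRowN_getElem row srow c0 W Ws i h2]
  rw [if_neg (by omega)]

theorem paintRowN_slice (row srow : List Int) (c0 : Int) (W Ws : Nat)
    (hlt : max 0 c0 < min (W : Int) (c0 + (Ws : Int)))
    (hrow : min (W : Int) (c0 + (Ws : Int)) ≤ (row.length : Int))
    (hsrc : min (W : Int) (c0 + (Ws : Int)) - c0 ≤ (srow.length : Int)) :
    paintRowN row srow c0 W Ws =
      PySem.List.slice row none (some (max 0 c0)) ++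
      ((PySem.List.slice srow (some (max 0 c0 - c0)) (some (min (W : Int) (c0 + (Ws : Int)) - c0))).map
        (fun v => min 9 (max 0 v))) ++
      PySem.List.slice row (some (min (W : Int) (c0 + (Ws : Int)))) none := by
  rw [PySem.List.slice_to row (by omega), PySem.List.slice_from row (by omega),
      PySem.List.slice_toNat srow (by omega) (by omega)]
  have lenA : (List.take (max 0 c0).toNat row).length = (max 0 c0).toNat := by
    rw [List.length_take]; omega
  have lenB : ((PySem.List.slice srow (some (max 0 c0 - c0)) (some (min (W : Int) (c0 + (Ws : Int)) - c0))).map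
        (fun v => min 9 (max 0 v))).length
      = (min (W : Int) (c0 + (Ws : Int))).toNat - (max 0 c0).toNat := by
    rw [PySem.List.slice_toNat srow (by omega) (by omega)]
    simp only [List.length_map, List.length_take, List.length_drop]
    omega
  rw [PySem.List.slice_toNat srow (by omega) (by omega)] at lenB
  apply List.ext_getElem
  · simp only [paintRowN_length, List.length_append, List.length_take, List.length_drop,
      List.length_map]
    omega
  · intro i h1 h2
    rw [paintRowN_getElem row srow c0 W Ws i (by rw [← paintRowN_length row srow c0 W Ws]; exact h1)]
    by_cases hc1 : i < (max 0 c0).toNat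
    · rw [List.getElem_append_left (by rw [List.length_append, lenA, lenB]; omega),
          List.getElem_append_left (by rw [lenA]; omega), List.getElem_take,
          if_neg (by omega)]
    · by_cases hc2 : (i : Int) < min (W : Int) (c0 + (Ws : Int))
      · rw [List.getElem_append_left (by rw [List.length_append, lenA, lenB]; omega),
            List.getElem_append_right (by rw [lenA]; omega),
            List.getElem_map, List.getElem_take, List.getElem_drop,
            if_pos (by omega),
            PySem.List.pyGetD_eq_getElem srow 0 (by omega) (by omega), dsl_clamp_eq_minmax]
        have hidx : ((i : Int) - c0).toNat
            = (max 0 c0 - c0).toNat + (i - (List.take (max 0 c0).toNat row).length) := by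
          rw [lenA]; omega
        simp only [hidx]
      · rw [List.getElem_append_right (by rw [List.length_append, lenA, lenB]; omega),
            List.getElem_drop, if_neg (by omega)]
        congr 1
        rw [List.length_append, lenA, lenB]
        omega

theorem headLen_set (S : List (List Int)) (n : Nat) (v : List Int)
    (hv : ∀ _ : n < S.length, v.length = (S[n]).length) :
    (((S.set n v).head?.getD []).length) = (((S.head?.getD []).length)) := by
  cases S with
  | nil => simp
  | cons a as =>
    cases n with
    | zero => simpa using hv (by simp)
    | succ m => simp

-- A's inner loop writes exactly paintRowN into row rr (when rr is in range)
theorem inner_char (c0 rr : Int) (srow : List Int) (m : Nat) (S : List (List Int)) (W : Nat)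
    (hW : ((S.head?.getD []).length) = W) :
    List.foldl (fun T c =>
        if dsl_in_bounds T rr (c0 + c) then
          PySem.List.pySetD T rr
            (PySem.List.pySetD (PySem.List.pyGetD T rr []) (c0 + c)
              (dsl_clamp (PySem.List.pyGetD srow c 0)))
        else T) S ((List.range m).map (fun (k : Nat) => (k : Int)))
    = if 0 ≤ rr ∧ rr < (S.length : Int) then
        S.set rr.toNat (paintRowN (PySem.List.pyGetD S rr []) srow c0 W m)
      else S := by
  induction m with
  | zero =>
    simp only [List.range_zero, List.map_nil, List.foldl_nil, paintRowN]
    split_ifs with h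
    · rw [PySem.List.pyGetD_eq_getElem S [] h.1 h.2, List.set_getElem_self]
    · rfl
  | succ m ih =>
    rw [List.range_succ, List.map_append, List.foldl_append, ih]
    simp only [List.map_cons, List.map_nil, List.foldl_cons, List.foldl_nil]
    by_cases h : 0 ≤ rr ∧ rr < (S.length : Int)
    · rw [if_pos h, if_pos h]
      have hrow : PySem.List.pyGetD S rr [] = S[rr.toNat]'(by omega) :=
        PySem.List.pyGetD_eq_getElem S [] h.1 h.2
      have hWset : (((S.set rr.toNat (paintRowN (PySem.List.pyGetD S rr []) srow c0 W m)).head?.getD []).length) = W := by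
        rw [headLen_set]
        · exact hW
        · intro hlt
          rw [paintRowN_length, hrow]
      have hib : dsl_in_bounds (S.set rr.toNat (paintRowN (PySem.List.pyGetD S rr []) srow c0 W m)) rr (c0 + (m : Int))
          = decide (0 ≤ c0 + (m : Int) ∧ c0 + (m : Int) < (W : Int)) := by
        simp only [dsl_in_bounds, dsl_shape_fst, dsl_shape_snd, hWset, List.length_set,
          decide_eq_decide]
        constructor
        · rintro ⟨_, _, h3, h4⟩; exact ⟨h3, h4⟩
        · rintro ⟨h3, h4⟩; exact ⟨h.1, h.2, h3, h4⟩
      by_cases hc : 0 ≤ c0 + (m : Int) ∧ c0 + (m : Int) < (W : Int)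
      · rw [hib, if_pos (by simpa using hc)]
        have hget : PySem.List.pyGetD (S.set rr.toNat (paintRowN (PySem.List.pyGetD S rr []) srow c0 W m)) rr []
            = paintRowN (PySem.List.pyGetD S rr []) srow c0 W m := by
          rw [PySem.List.pyGetD_eq_getElem _ [] h.1 (by simpa using h.2), List.getElem_set,
            if_pos rfl]
        rw [hget, PySem.List.pySetD_of_nonneg _ _ hc.1, PySem.List.pySetD_of_nonneg _ _ h.1,
          List.set_set]
        have hpaint : paintRowN (PySem.List.pyGetD S rr []) srow c0 W (m+1)
            = (paintRowN (PySem.List.pyGetD S rr []) srow c0 W m).set (c0 + (m : Int)).toNat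
                (dsl_clamp (PySem.List.pyGetD srow (m : Int) 0)) := by
          simp only [paintRowN]; rw [if_pos hc]
        rw [hpaint]
      · rw [hib, if_neg (by simpa using hc)]
        have hpaint : paintRowN (PySem.List.pyGetD S rr []) srow c0 W (m+1)
            = paintRowN (PySem.List.pyGetD S rr []) srow c0 W m := by
          simp only [paintRowN]; rw [if_neg hc]
        rw [hpaint]
    · rw [if_neg h, if_neg h]
      have hib : dsl_in_bounds S rr (c0 + (m : Int)) = false := by
        simp only [dsl_in_bounds, dsl_shape_fst, decide_eq_false_iff_not]
        intro hcon
        exact h ⟨hcon.1, hcon.2.1⟩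
      rw [hib]
      simp

theorem headLen_map_enumerate (G : List (List Int)) (f : Int × List Int → List Int)
    (hf : ∀ p, (f p).length = p.2.length) :
    (((((PySem.List.enumerate G 0).map f).head?.getD []).length)) = ((G.head?.getD []).length) := by
  cases G with
  | nil => simp [PySem.List.enumerate_nil]
  | cons g gs => simp [PySem.List.enumerate_cons, hf]

-- A's outer loop paints rows r0 ≤ i < r0 + n of G, in enumerate-map form
theorem outer_char (G src : List (List Int)) (r0 c0 : Int) (n : Nat) :
    List.foldl (fun S r =>
        List.foldl (fun T c =>
            if dsl_in_bounds T (r0 + r) (c0 + c) then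
              PySem.List.pySetD T (r0 + r)
                (PySem.List.pySetD (PySem.List.pyGetD T (r0 + r) []) (c0 + c)
                  (dsl_clamp (PySem.List.pyGetD (PySem.List.pyGetD src r []) c 0)))
            else T) S ((List.range (src.head?.getD []).length).map (fun (k : Nat) => (k : Int))))
      G ((List.range n).map (fun (k : Nat) => (k : Int)))
    = (PySem.List.enumerate G 0).map (fun p =>
        if r0 ≤ p.1 ∧ p.1 < r0 + (n : Int) then
          paintRowN p.2 (PySem.List.pyGetD src (p.1 - r0) []) c0 ((G.head?.getD []).length)
            ((src.head?.getD []).length)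
        else p.2) := by
  induction n with
  | zero =>
    simp only [List.range_zero, List.map_nil, List.foldl_nil]
    rw [List.map_congr_left (g := fun p => p.2) (fun p _ => by rw [if_neg (by omega)]),
      PySem.List.map_snd_enumerate]
  | succ n ih =>
    rw [List.range_succ, List.map_append, List.foldl_append, ih]
    simp only [List.map_cons, List.map_nil, List.foldl_cons, List.foldl_nil]
    rw [inner_char c0 (r0 + (n : Int)) (PySem.List.pyGetD src (n : Int) []) _ _
      ((G.head?.getD []).length)
      (headLen_map_enumerate G _ (fun p => by split_ifs <;> simp [paintRowN_length]))]
    have hlenM : ((PySem.List.enumerate G 0).map (fun p =>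
        if r0 ≤ p.1 ∧ p.1 < r0 + (n : Int) then
          paintRowN p.2 (PySem.List.pyGetD src (p.1 - r0) []) c0 ((G.head?.getD []).length)
            ((src.head?.getD []).length)
        else p.2)).length = G.length := by
      rw [List.length_map, PySem.List.length_enumerate]
    by_cases h : 0 ≤ r0 + (n : Int) ∧ r0 + (n : Int) < (G.length : Int)
    · rw [if_pos (by rw [hlenM]; exact_mod_cast h)]
      have hidx : (r0 + (n : Int)).toNat < G.length := by omega
      have hgetM : PySem.List.pyGetD ((PySem.List.enumerate G 0).map (fun p =>
          if r0 ≤ p.1 ∧ p.1 < r0 + (n : Int) then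
            paintRowN p.2 (PySem.List.pyGetD src (p.1 - r0) []) c0 ((G.head?.getD []).length)
              ((src.head?.getD []).length)
          else p.2)) (r0 + (n : Int)) []
          = G[(r0 + (n : Int)).toNat] := by
        rw [PySem.List.pyGetD_eq_getElem _ [] h.1 (by rw [hlenM]; exact_mod_cast h.2),
          List.getElem_map, PySem.List.getElem_enumerate]
        rw [if_neg (by dsimp only; omega)]
      rw [hgetM]
      apply List.ext_getElem
      · simp only [List.length_set, hlenM, List.length_map, PySem.List.length_enumerate]
      · intro j h1 h2
        rw [List.getElem_set]
        simp only [List.length_set, hlenM] at h1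
        by_cases he : (r0 + (n : Int)).toNat = j
        · rw [if_pos he]
          rw [List.getElem_map, PySem.List.getElem_enumerate]
          rw [if_pos (by dsimp only; omega)]
          have hsr : (0 : Int) + (j : Int) - r0 = (n : Int) := by omega
          dsimp only
          simp only [hsr, he]
        · rw [if_neg he, List.getElem_map, List.getElem_map, PySem.List.getElem_enumerate]
          dsimp only
          split_ifs with ha hb hb
          · rfl
          · omega
          · omega
          · rfl
    · rw [if_neg (by rw [hlenM]; exact_mod_cast h)]
      apply List.map_congr_left
      intro p hp
      obtain ⟨k, hk, rfl⟩ := (PySem.List.mem_enumerate_iff G 0 p).mp hp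
      dsimp only
      split_ifs with ha hb hb
      · rfl
      · omega
      · omega
      · rfl

theorem foldl_ite_append {α β : Type} (C : β → Prop) [DecidablePred C] (f g : β → α)
    (l : List β) (acc : List α) :
    List.foldl (fun out p => if C p then out ++ [f p] else out ++ [g p]) acc l
      = acc ++ l.map (fun p => if C p then f p else g p) := by
  induction l generalizing acc with
  | nil => simp
  | cons x xs ih =>
    simp only [List.foldl_cons, List.map_cons]
    split_ifs <;> simp [ih]

-- ===== VERDICT (by name: the statement is the Claim_ definition above) =====
theorem dsl_paste_spec : Claim_equal_dsl_paste := by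
  intro G src r0 c0 _hDom hPre
  unfold Spec_dsl_paste
  have hA : dsl_paste G src r0 c0
      = (PySem.List.enumerate G 0).map (fun p =>
          if r0 ≤ p.1 ∧ p.1 < r0 + (src.length : Int) then
            paintRowN p.2 (PySem.List.pyGetD src (p.1 - r0) []) c0 ((G.head?.getD []).length)
              ((src.head?.getD []).length)
          else p.2) := by
    simp only [dsl_paste, dsl_clone_eq, dsl_shape_fst, dsl_shape_snd,
      PySem.List.pyRange_zero_natCast]
    exact outer_char G src r0 c0 src.length
  have hB : dsl_paste_alt G src r0 c0
      = (PySem.List.enumerate G 0).map (fun p =>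
          if max 0 r0 ≤ p.1 ∧ p.1 < min (G.length : Int) (r0 + (src.length : Int)) ∧
              max 0 c0 < min ((G.head?.getD []).length : Int) (c0 + ((src.head?.getD []).length : Int)) then
            PySem.List.slice p.2 none (some (max 0 c0)) ++
            ((PySem.List.slice (PySem.List.pyGetD src (p.1 - r0) [])
                (some (max 0 c0 - c0))
                (some (min ((G.head?.getD []).length : Int) (c0 + ((src.head?.getD []).length : Int)) - c0))).map
              (fun v => min 9 (max 0 v))) ++
            PySem.List.slice p.2
              (some (min ((G.head?.getD []).length : Int) (c0 + ((src.head?.getD []).length : Int)))) none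
          else PySem.List.slice p.2 none none) := by
    simp only [dsl_paste_alt, matchW_eq]
    rw [foldl_ite_append]
    simp
  rw [hA, hB]
  apply List.map_congr_left
  intro p hp
  obtain ⟨k, hk, rfl⟩ := (PySem.List.mem_enumerate_iff G 0 p).mp hp
  simp only [zero_add, PySem.List.slice_none_none]
  by_cases hAc : r0 ≤ (k : Int) ∧ (k : Int) < r0 + (src.length : Int)
  · by_cases hC : max 0 c0 < min (((G.head?.getD []).length : Nat) : Int) (c0 + (((src.head?.getD []).length : Nat) : Int))
    · rw [if_pos hAc, if_pos ⟨by omega, by omega, hC⟩]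
      -- derive the in-range facts for this row from Pre_
      have hr0 : (0 : Int) ≤ (k : Int) - r0 := by omega
      have hrN : ((k : Int) - r0).toNat < src.length := by omega
      have hrcast : (((((k : Int) - r0).toNat : Nat)) : Int) = (k : Int) - r0 := by omega
      have hcN : ((min ((G.head?.getD []).length : Int) (c0 + ((src.head?.getD []).length : Int)) - 1 - c0).toNat) < (src.head?.getD []).length := by omega
      have hpre := hPre (((k : Int) - r0).toNat) hrN _ hcN
        (by refine ⟨by omega, by omega, by omega, by omega⟩)
      have hGk : (G[(r0 + ((((k : Int) - r0).toNat : Nat) : Int)).toNat]?).getD [] = G[k] := by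
        have : (r0 + ((((k : Int) - r0).toNat : Nat) : Int)).toNat = k := by omega
        rw [this, List.getElem?_eq_getElem hk, Option.getD_some]
      have hsrc_eq : PySem.List.pyGetD src ((k : Int) - r0) []
          = src[(((k : Int) - r0).toNat)]'hrN := by
        exact PySem.List.pyGetD_eq_getElem src [] hr0 (by omega)
      have hsrcK : (src[(((k : Int) - r0).toNat)]?).getD [] = src[(((k : Int) - r0).toNat)]'hrN := by
        rw [List.getElem?_eq_getElem hrN, Option.getD_some]
      rw [hGk] at hpre
      rw [hsrcK] at hpre
      apply paintRowN_slice
      · exact hC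
      · have := hpre.2
        push_cast at this ⊢
        omega
      · have := hpre.1
        rw [hsrc_eq]
        push_cast at this ⊢
        omega
    · rw [if_pos hAc, if_neg (by intro hcon; exact hC hcon.2.2)]
      exact paintRowN_self _ _ _ _ _ hC
  · rw [if_neg hAc, if_neg (by intro hcon; apply hAc; constructor <;> omega)]
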